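-- pv_equiv track=rewrite | github.com/gaberani/AlgorithmStudy | 1025/최고의 집합.py | solution
-- ===== SOURCE A (Python) =====
-- def solution(n, s):
--     if n > s:
--         return [-1]
--     value, remain = s//n, s%n
--     answer = [value]*n
--     for i in range(remain):
--         answer[i] += 1
--     answer.sort()
--     return answer
-- ===== SOURCE B (Python) =====
-- def solution(n, s):
--     if n > s:
--         return [-1]
--     answer = []
--     while n > 0:
--         v = s // n
--         answer.append(v)
--         s -= v
--         n -= 1
--     return answer
-- ===== Notes on version B (the rewrite author's own statement) =====
-- stated objective: alternative
-- what changed: B computes the answer greedily in one pass, taking the floor average s//n of the remaining sum as each next element and shrinking s and n, instead of A's divmod split, per-index increment loop and final sort.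
import Mathlib
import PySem

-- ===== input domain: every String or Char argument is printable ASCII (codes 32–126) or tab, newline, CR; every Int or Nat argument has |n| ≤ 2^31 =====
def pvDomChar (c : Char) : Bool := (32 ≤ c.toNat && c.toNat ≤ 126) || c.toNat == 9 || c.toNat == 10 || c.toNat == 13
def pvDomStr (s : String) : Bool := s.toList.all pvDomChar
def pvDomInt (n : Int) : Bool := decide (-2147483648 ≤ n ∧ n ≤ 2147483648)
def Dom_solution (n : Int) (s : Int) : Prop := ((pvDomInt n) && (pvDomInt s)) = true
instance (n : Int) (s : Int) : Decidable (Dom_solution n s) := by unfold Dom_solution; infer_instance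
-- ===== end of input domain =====

-- B builds the answer greedily, one element at a time (next element = s // n on the remaining sum
-- and count), instead of A's divmod + per-index increment loop + sort; alternative algorithm.

-- ===== PORT A =====
def solution (n : Int) (s : Int) : List Int :=
  if n > s then [-1]
  else
    let value := PySem.Int.floordiv s n
    let remain := PySem.Int.mod s n
    let answer := List.replicate n.toNat value
    let answer := (PySem.List.pyRange 0 remain 1).foldl
      (fun acc i => acc.set i.toNat ((acc.getD i.toNat 0) + 1)) answer
    PySem.List.sorted answer (fun x => x) false

-- ===== PORT B =====
-- while n > 0: v = s//n; answer.append(v); s -= v; n -= 1   — ported as recursion on the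
-- iteration count n.toNat (the loop runs exactly n.toNat times, n decreasing by 1 each pass).
def pvGreedy (k : Nat) (n : Int) (s : Int) : List Int :=
  match k with
  | 0 => []
  | Nat.succ k =>
    let v := PySem.Int.floordiv s n
    v :: pvGreedy k (n - 1) (s - v)

def solution_alt (n : Int) (s : Int) : List Int :=
  if n > s then [-1]
  else pvGreedy n.toNat n s

-- ===== PRECONDITION & SPEC =====
-- Pre_ excludes exactly the inputs where Python A raises ZeroDivisionError: n = 0 with 0 ≤ s (the n > s guard does not fire).
def Pre_solution (n : Int) (s : Int) : Prop := n ≠ 0 ∨ s < 0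
instance (n : Int) (s : Int) : Decidable (Pre_solution n s) := by unfold Pre_solution; infer_instance
def pvWitness_solution : Int × Int := (3, 7)

def Spec_solution (n : Int) (s : Int) (out : List Int) : Prop := out = solution_alt n s
instance (n : Int) (s : Int) (out : List Int) : Decidable (Spec_solution n s out) := by unfold Spec_solution; infer_instance

-- ===== CLAIM (what is proved, stated in full; the proofs are below) =====
def Claim_equal_solution : Prop := ∀ (n : Int) (s : Int), Dom_solution n s → Pre_solution n s → Spec_solution n s (solution n s)

-- ===== LEMMAS AND PROOFS =====

-- A's increment loop turns [v]*m into [v+1]*r ++ [v]*(m-r) (for r ≤ m).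
theorem pv_loop_eq (r : Nat) : ∀ (m : Nat) (v : Int), r ≤ m →
    (PySem.List.pyRange 0 (r : Int) 1).foldl
      (fun acc i => acc.set i.toNat ((acc.getD i.toNat 0) + 1)) (List.replicate m v)
    = List.replicate r (v + 1) ++ List.replicate (m - r) v := by
  induction r with
  | zero => intro m v _; simp [PySem.List.pyRange_one_eq_nil]
  | succ r ih =>
    intro m v hrm
    have hcast : ((r + 1 : Nat) : Int) = (r : Int) + 1 := by push_cast; ring
    rw [hcast, PySem.List.pyRange_one_succ_right (by positivity), List.foldl_append,
      ih m v (by omega)]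
    simp only [List.foldl_cons, List.foldl_nil]
    have hr : ((r : Int)).toNat = r := by simp
    rw [hr]
    have hget : (List.replicate r (v + 1) ++ List.replicate (m - r) v).getD r 0 = v := by
      rw [List.getD_append_right _ _ _ _ (by simp), List.length_replicate, Nat.sub_self]
      have hm : m - r = (m - (r + 1)) + 1 := by omega
      rw [hm, List.replicate_succ]
      rfl
    rw [hget]
    have hset : (List.replicate r (v + 1) ++ List.replicate (m - r) v).set r (v + 1)
        = List.replicate (r + 1) (v + 1) ++ List.replicate (m - (r + 1)) v := by
      rw [List.set_append_right r (v + 1) (by simp), List.length_replicate, Nat.sub_self]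
      have : m - r = (m - (r + 1)) + 1 := by omega
      rw [this, List.replicate_succ, List.set_cons_zero,
        List.replicate_succ' (n := r)]
      simp
    rw [hset]

-- B's greedy loop on n = k, s = k*v + r (0 ≤ r < k, or k = 0) yields the sorted split.
theorem pv_greedy_eq : ∀ (k : Nat) (v r : Int), 0 ≤ r → ((r : Int) < k ∨ (k = 0 ∧ r = 0)) →
    pvGreedy k (k : Int) ((k : Int) * v + r)
    = List.replicate (k - r.toNat) v ++ List.replicate r.toNat (v + 1) := by
  intro k
  induction k with
  | zero =>
    intro v r h0 hc
    have : r = 0 := by omega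
    simp [pvGreedy, this]
  | succ k ih =>
    intro v r h0 hc
    have hrk : r < (k : Int) + 1 := by
      rcases hc with h | h
      · push_cast at h; omega
      · omega
    have hfd : PySem.Int.floordiv ((((k : Nat) + 1 : Nat) : Int) * v + r) (((k : Nat) + 1 : Nat) : Int) = v := by
      rw [PySem.Int.floordiv_eq_ediv_of_pos (by push_cast; omega)]
      have h1 : (((k : Nat) + 1 : Nat) : Int) * v + r = r + v * (((k : Nat) + 1 : Nat) : Int) := by
        ring
      rw [h1, Int.add_mul_ediv_right r v (by push_cast; omega),
        Int.ediv_eq_zero_of_lt h0 (by push_cast; omega)]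
      ring
    show (PySem.Int.floordiv _ _) :: pvGreedy k _ _ = _
    rw [hfd]
    have hn1 : (((k : Nat) + 1 : Nat) : Int) - 1 = (k : Int) := by push_cast; ring
    have hs1 : (((k : Nat) + 1 : Nat) : Int) * v + r - v = (k : Int) * v + r := by push_cast; ring
    rw [hn1, hs1]
    by_cases hlt : r < (k : Int)
    · rw [ih v r h0 (Or.inl hlt)]
      have h1 : (k + 1) - r.toNat = ((k - r.toNat) + 1 : Nat) := by omega
      rw [h1, List.replicate_succ]
      simp
    · have hrk' : r = (k : Int) := by omega
      have hs2 : (k : Int) * v + r = (k : Int) * (v + 1) + 0 := by rw [hrk']; ring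
      rw [hs2, ih (v + 1) 0 le_rfl (by
        rcases Nat.eq_zero_or_pos k with h | h
        · exact Or.inr ⟨h, rfl⟩
        · exact Or.inl (by exact_mod_cast h))]
      have h1 : (k + 1) - r.toNat = 1 := by omega
      have h2 : r.toNat = k := by omega
      rw [h1, h2]
      simp [List.replicate_succ]

-- The canonical sorted split both ports reduce to (for n > 0).
theorem pv_A_eq_canonical (n s : Int) (hn : 0 < n) (hns : ¬ n > s) :
    solution n s
    = List.replicate (n - PySem.Int.mod s n).toNat (PySem.Int.floordiv s n)
      ++ List.replicate (PySem.Int.mod s n).toNat (PySem.Int.floordiv s n + 1) := by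
  simp only [solution, if_neg hns]
  set v := PySem.Int.floordiv s n with hv
  set r := PySem.Int.mod s n with hrdef
  have hr0 : 0 ≤ r ∧ r < n := by
    rw [hrdef, PySem.Int.mod_eq_emod_of_pos hn]
    exact ⟨Int.emod_nonneg s (by omega), Int.emod_lt_of_pos s hn⟩
  have hcast : r = ((r.toNat : Nat) : Int) := by omega
  rw [hcast, pv_loop_eq r.toNat n.toNat v (by omega)]
  apply PySem.List.sorted_id_eq_of_perm_of_pairwise
  · have h2 : (n - ((r.toNat : Nat) : Int)).toNat = n.toNat - r.toNat := by omega
    have h3 : (((r.toNat : Nat) : Int)).toNat = r.toNat := by omega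
    rw [h2, h3]
    exact List.perm_append_comm
  · apply List.pairwise_append.2
    refine ⟨List.pairwise_replicate.2 ?_, List.pairwise_replicate.2 ?_, ?_⟩
    · omega
    · omega
    · intro a ha b hb
      rw [List.eq_of_mem_replicate ha, List.eq_of_mem_replicate hb]
      omega

-- ===== VERDICT =====
theorem solution_spec : Claim_equal_solution := by
  unfold Claim_equal_solution Spec_solution
  intro n s _ hpre
  by_cases hgt : n > s
  · unfold solution solution_alt; simp [hgt]
  · by_cases hn : 0 < n
    · rw [pv_A_eq_canonical n s hn hgt]
      set v := PySem.Int.floordiv s n with hv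
      set r := PySem.Int.mod s n with hrdef
      have hr0 : 0 ≤ r ∧ r < n := by
        rw [hrdef, PySem.Int.mod_eq_emod_of_pos hn]
        exact ⟨Int.emod_nonneg s (by omega), Int.emod_lt_of_pos s hn⟩
      have hsum : n * v + r = s := by
        rw [hv, hrdef, PySem.Int.floordiv_eq_ediv_of_pos hn, PySem.Int.mod_eq_emod_of_pos hn]
        exact Int.mul_ediv_add_emod s n
      have hk : ((n.toNat : Nat) : Int) = n := by omega
      have hbig := pv_greedy_eq n.toNat v r hr0.1 (Or.inl (by omega))
      rw [hk] at hbig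
      rw [hsum] at hbig
      simp only [solution_alt, if_neg hgt]
      rw [hbig]
      have h4 : (n - r).toNat = n.toNat - r.toNat := by omega
      rw [h4]
    · -- n < 0 (n = 0 excluded by Pre_ together with ¬ n > s): both sides are []
      have hn' : n < 0 := by rcases hpre with h | h <;> omega
      have hk0 : n.toNat = 0 := by omega
      simp only [solution, solution_alt, if_neg hgt, hk0]
      set r := PySem.Int.mod s n with hrdef
      have hmm : PySem.Int.mod s n = -PySem.Int.mod (-s) (-n) := by
        have h := PySem.Int.mod_neg_neg (-s) (-n)
        rw [neg_neg, neg_neg] at h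
        omega
      have hb : 0 ≤ PySem.Int.mod (-s) (-n) ∧ PySem.Int.mod (-s) (-n) < -n := by
        rw [PySem.Int.mod_eq_emod_of_pos (by omega)]
        exact ⟨Int.emod_nonneg _ (by omega), Int.emod_lt_of_pos _ (by omega)⟩
      have hr0 : n < r ∧ r ≤ 0 := by rw [hrdef, hmm]; omega
      rw [PySem.List.pyRange_one_eq_nil hr0.2]
      simp [pvGreedy, PySem.List.sorted]
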